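-- pv_equiv track=rewrite | github.com/stanykey/puzzles | solution.py | _create_tree_data
-- ===== SOURCE A (Python) =====
-- def _create_tree_data(tiers: int) -> list[str]:
--     data: list[str] = []
--
--     current_tier = ['*']
--     for i in range(0, tiers):
--         current_tier.append(current_tier[-1] + '**')
--         data.extend(current_tier)
--
--     max_stars_count = len(data[-1])
--     data = [f'{line: ^{max_stars_count}}' for line in data]
--     return data
-- ===== SOURCE B (Python) =====
-- def _create_tree_data(tiers: int) -> list[str]:
--     data = ['*' * (2 * j + 1) for i in range(tiers) for j in range(i + 2)]
--     width = len(data[-1])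
--     return [line.center(width) for line in data]
-- ===== Notes on version B (the rewrite author's own statement) =====
-- stated objective: simpler
-- what changed: Replaces A's loop that mutates a growing current_tier list and repeatedly extends data with a copy of it by a direct nested comprehension emitting '*'*(2*j+1), plus str.center for the padding.
import Mathlib
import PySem

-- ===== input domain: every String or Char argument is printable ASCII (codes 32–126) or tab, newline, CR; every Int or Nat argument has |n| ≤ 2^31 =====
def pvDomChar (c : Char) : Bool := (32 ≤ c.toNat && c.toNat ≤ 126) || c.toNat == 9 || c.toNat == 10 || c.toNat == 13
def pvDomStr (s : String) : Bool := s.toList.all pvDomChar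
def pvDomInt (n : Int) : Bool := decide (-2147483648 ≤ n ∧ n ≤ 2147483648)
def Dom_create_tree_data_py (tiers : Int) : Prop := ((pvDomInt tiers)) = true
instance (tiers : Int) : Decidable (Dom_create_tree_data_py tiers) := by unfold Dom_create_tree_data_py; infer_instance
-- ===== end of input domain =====

-- B replaces A's loop that grows a mutated `current_tier` and repeatedly extends `data` with it
-- by a direct nested comprehension emitting '*'*(2*j+1); objective: simpler (same widths, same IndexError on tiers<=0).

-- Shared string helpers, ported by hand (no PySem primitive): exact on the inputs reached here.
-- pvCenter = Python centering with space fill (f'{line: ^{w}}' in A, line.center(w) in B): both pad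
-- with (w-len)//2 spaces left and the rest right; the two Python forms agree whenever w-len is even,
-- which is the only case arising (odd width, odd line lengths).
def pvCenter (line : String) (w : Nat) : String :=
  let cs := line.toList
  if w ≤ cs.length then line
  else String.ofList (List.replicate ((w - cs.length) / 2) ' ' ++ cs ++
                  List.replicate ((w - cs.length) - (w - cs.length) / 2) ' ')

-- ===== PORT A =====
-- 'current_tier[-1]' is ported as getLast?.getD "": the list is never empty, so Python never raises there.
-- 'data[-1]' on empty data raises IndexError in Python: those inputs (tiers ≤ 0) are outside Pre_.
def create_tree_data_py (tiers : Int) : List String :=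
  let st := (PySem.List.pyRange 0 tiers 1).foldl
    (fun (st : List String × List String) (_i : Int) =>
      let ct := st.2 ++ [String.ofList ((st.2.getLast?.getD "").toList ++ ['*', '*'])]
      (st.1 ++ ct, ct))
    ([], ["*"])
  let data := st.1
  let max_stars_count := (data.getLast?.getD "").toList.length
  data.map (fun line => pvCenter line max_stars_count)

-- ===== PORT B =====
-- '*' * (2*j+1) ported by hand as List.replicate (exact: the count is nonnegative here).
def create_tree_data_py_alt (tiers : Int) : List String :=
  let data := (PySem.List.pyRange 0 tiers 1).flatMap
    (fun i => (PySem.List.pyRange 0 (i + 2) 1).map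
      (fun j => String.ofList (List.replicate (2 * j + 1).toNat '*')))
  let width := (data.getLast?.getD "").toList.length
  data.map (fun line => pvCenter line width)

-- ===== PRECONDITION & SPEC =====
-- Pre_ excludes tiers ≤ 0, where Python A raises IndexError on data[-1] (and Python B raises the same).
def Pre_create_tree_data_py (tiers : Int) : Prop := 1 ≤ tiers
instance (tiers : Int) : Decidable (Pre_create_tree_data_py tiers) := by unfold Pre_create_tree_data_py; infer_instance
def pvWitness_create_tree_data_py : Int := 3

def Spec_create_tree_data_py (tiers : Int) (out : List String) : Prop := out = create_tree_data_py_alt tiers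
instance (tiers : Int) (out : List String) : Decidable (Spec_create_tree_data_py tiers out) := by unfold Spec_create_tree_data_py; infer_instance

-- ===== CLAIM (what is proved, stated in full; the proofs are below) =====
def Claim_equal_create_tree_data_py : Prop := ∀ (tiers : Int), Dom_create_tree_data_py tiers → Pre_create_tree_data_py tiers → Spec_create_tree_data_py tiers (create_tree_data_py tiers)

-- ===== LEMMAS AND PROOFS =====

-- canonical forms (proof-side only)
def pvTier (n : Nat) : List String :=
  (List.range (n + 1)).map (fun j => String.ofList (List.replicate (2 * j + 1) '*'))

def pvData (n : Nat) : List String :=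
  (List.range n).flatMap (fun i => pvTier (i + 1))

theorem pvTier_getLast (n : Nat) :
    (pvTier n).getLast?.getD "" = String.ofList (List.replicate (2 * n + 1) '*') := by
  simp [pvTier, List.range_succ]

theorem pvTier_succ (n : Nat) :
    pvTier (n + 1) = pvTier n ++ [String.ofList (List.replicate (2 * (n + 1) + 1) '*')] := by
  simp [pvTier, List.range_succ]

-- A's loop invariant: the loop body ignores the loop variable, so only the length matters
theorem loopA_inv {a : Type} (l : List a) :
    l.foldl
      (fun (st : List String × List String) (_ : a) =>
        let ct := st.2 ++ [String.ofList ((st.2.getLast?.getD "").toList ++ ['*', '*'])]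
        (st.1 ++ ct, ct))
      ([], ["*"]) = (pvData l.length, pvTier l.length) := by
  induction l using List.reverseRecOn with
  | nil =>
      simp only [List.foldl_nil, List.length_nil]
      have h1 : pvData 0 = [] := rfl
      have h2 : pvTier 0 = [String.ofList ['*']] := rfl
      rw [h1, h2]
  | append_singleton l x ih =>
      rw [List.foldl_append, ih]
      simp only [List.foldl_cons, List.foldl_nil, List.length_append, List.length_singleton]
      have hcat : String.ofList (((pvTier l.length).getLast?.getD "").toList ++ ['*', '*'])
          = String.ofList (List.replicate (2 * (l.length + 1) + 1) '*') := by
        rw [pvTier_getLast]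
        congr 1
        simp only [String.toList_ofList]
        rw [show (['*', '*'] : List Char) = List.replicate 2 '*' from rfl]
        simp only [← List.replicate_add]
        congr 1
      rw [hcat, ← pvTier_succ]
      simp [pvData, List.range_succ]

-- B's data in canonical form (nonnegative bound as a Nat cast)
theorem dataB_eq (n : Nat) :
    ((PySem.List.pyRange 0 (n : Int) 1).flatMap
      (fun i => (PySem.List.pyRange 0 (i + 2) 1).map
        (fun j => String.ofList (List.replicate (2 * j + 1).toNat '*')))) = pvData n := by
  rw [PySem.List.pyRange_one]
  simp only [sub_zero, Int.toNat_natCast, List.flatMap_map]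
  unfold pvData
  refine List.flatMap_congr ?_
  intro k _
  rw [PySem.List.pyRange_one]
  have h1 : (((0 : Int) + (k : Int)) + 2 - 0).toNat = k + 2 := by omega
  rw [h1]
  unfold pvTier
  rw [List.map_map]
  refine List.map_congr_left ?_
  intro j _
  simp only [Function.comp]
  have h2 : (2 * ((0 : Int) + (j : Int)) + 1).toNat = 2 * j + 1 := by omega
  rw [h2]

theorem main_eq (tiers : Int) :
    create_tree_data_py tiers = create_tree_data_py_alt tiers := by
  unfold create_tree_data_py create_tree_data_py_alt
  have hlen : (PySem.List.pyRange 0 tiers 1).length = tiers.toNat := by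
    rw [PySem.List.length_pyRange_one]; omega
  have hA : ((PySem.List.pyRange 0 tiers 1).foldl
      (fun (st : List String × List String) (_i : Int) =>
        let ct := st.2 ++ [String.ofList ((st.2.getLast?.getD "").toList ++ ['*', '*'])]
        (st.1 ++ ct, ct))
      ([], ["*"])) = (pvData tiers.toNat, pvTier tiers.toNat) := by
    rw [loopA_inv (PySem.List.pyRange 0 tiers 1), hlen]
  have hB : ((PySem.List.pyRange 0 tiers 1).flatMap
      (fun i => (PySem.List.pyRange 0 (i + 2) 1).map
        (fun j => String.ofList (List.replicate (2 * j + 1).toNat '*')))) = pvData tiers.toNat := by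
    by_cases ht : 0 ≤ tiers
    · have h : tiers = ((tiers.toNat : Nat) : Int) := by omega
      rw [h]; exact dataB_eq tiers.toNat
    · rw [PySem.List.pyRange_one_eq_nil (by omega)]
      have h0 : tiers.toNat = 0 := by omega
      simp [h0, pvData]
  simp only [hA, hB]

-- ===== VERDICT (by name: the statement is the Claim_ definition above) =====
theorem create_tree_data_py_spec : Claim_equal_create_tree_data_py := by
  intro tiers _ _
  exact main_eq tiers
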